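-- pv_equiv track=rewrite | github.com/schwallergroup/gosybench | notebooks/explor_chem_nlp/utils.py | sequence_calculator
-- ===== SOURCE A (Python) =====
-- def sequence_recorder(cls):
--     if cls == "reaction set-up":
--         return "r-"
--
--     elif cls == "work-up":
--         return "w-"
--
--     elif cls == "purification":
--         return "p-"
--
--     elif cls == "analysis":
--         return "a-"
--
--     elif cls == "unclassified":
--         return "u-"
--
-- def sequence_checker(seq1, seq2, segm_parag):
--     flag1 = 0
--     flag2 = 0
--     if_break = 0
--
--     for i in range(len(segm_parag)):
--         chr = sequence_recorder(segm_parag[i]["text class"])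
--
--         if if_break == 0:
--             if chr == seq1:
--                 flag1 = 1
--                 if_break = 1
--             continue
--
--         if if_break == 1:
--             if chr == seq2:
--                 flag2 = 1
--
--     if flag1 == 1 & flag2 == 1:
--         return int(1)
--
--     else:
--         return int(0)
--
-- def sequence_calculator(seq1, seq2, list_examples):
--     total = 0
--     for segm_parag in list_examples:
--         value = sequence_checker(seq1, seq2, segm_parag)
--         total = total + value
--
--     output_string = (
--         "The number of sequence starting with " + seq1 + " and ending with " + seq2 + " is: "
--     )
--
--     return total
-- ===== SOURCE B (Python) =====
-- _CODES = {
--     "reaction set-up": "r-",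
--     "work-up": "w-",
--     "purification": "p-",
--     "analysis": "a-",
--     "unclassified": "u-",
-- }
--
-- def _has_sequence(seq1, seq2, segm_parag):
--     codes = [_CODES.get(p["text class"]) for p in segm_parag]
--     if seq1 not in codes:
--         return False
--     return seq2 in codes[codes.index(seq1) + 1:]
--
-- def sequence_calculator(seq1, seq2, list_examples):
--     return sum(1 for ex in list_examples if _has_sequence(seq1, seq2, ex))
-- ===== Notes on version B (the rewrite author's own statement) =====
-- stated objective: simpler
-- what changed: Replaced the three functions and the flag/if_break state machine with a single count of examples whose code list (class mapped through a dict, None for unknown) contains seq1 and has seq2 strictly after its first occurrence, via index/slice membership.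
import Mathlib
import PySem

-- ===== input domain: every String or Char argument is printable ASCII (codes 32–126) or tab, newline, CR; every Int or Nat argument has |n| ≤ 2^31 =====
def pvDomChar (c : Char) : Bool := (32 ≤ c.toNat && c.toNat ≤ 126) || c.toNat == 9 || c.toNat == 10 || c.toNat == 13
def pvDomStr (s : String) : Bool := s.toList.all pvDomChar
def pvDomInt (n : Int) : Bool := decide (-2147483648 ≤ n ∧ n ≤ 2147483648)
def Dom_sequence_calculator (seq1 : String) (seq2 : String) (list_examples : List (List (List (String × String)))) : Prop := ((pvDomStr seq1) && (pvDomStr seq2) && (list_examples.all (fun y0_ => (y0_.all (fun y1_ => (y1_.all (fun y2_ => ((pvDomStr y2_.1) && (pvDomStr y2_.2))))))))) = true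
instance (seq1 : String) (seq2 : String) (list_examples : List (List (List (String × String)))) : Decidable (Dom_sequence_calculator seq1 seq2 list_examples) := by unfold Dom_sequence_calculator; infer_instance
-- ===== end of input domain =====

-- B inlines A's three functions into one count: map each paragraph's class through a
-- dict to a code (None when unknown), then count examples where seq2 occurs strictly
-- after the first occurrence of seq1 (objective: simpler).


-- ===== PORT A =====
def sequence_recorder (cls : String) : Option String :=
  if cls == "reaction set-up" then some "r-"
  else if cls == "work-up" then some "w-"
  else if cls == "purification" then some "p-"
  else if cls == "analysis" then some "a-"
  else if cls == "unclassified" then some "u-"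
  else none  -- Python falls off the end: returns None

-- p["text class"]: first-match dict lookup; none = KeyError (excluded by Pre_)
def pvLookupTC (p : List (String × String)) : Option String :=
  PySem.Dict.get? (PySem.Dict.mk p) "text class"

-- the loop body of sequence_checker, on the already-computed chr
def pvStepCore (seq1 seq2 : String) (st : Int × Int × Int) (chr : Option String) :
    Int × Int × Int :=
  let (flag1, flag2, if_break) := st
  if if_break == 0 then
    -- 'continue' after this branch: the second 'if' is skipped
    if chr == some seq1 then (1, flag2, 1) else (flag1, flag2, if_break)
  else if if_break == 1 then
    if chr == some seq2 then (flag1, 1, if_break) else (flag1, flag2, if_break)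
  else (flag1, flag2, if_break)

def sequence_checker (seq1 seq2 : String) (segm_parag : List (List (String × String))) : Int :=
  let st :=
    (PySem.List.pyRange 0 (segm_parag.length : Int) 1).foldl
      (fun st i =>
        pvStepCore seq1 seq2 st
          ((pvLookupTC (PySem.List.pyGetD segm_parag i [])).bind sequence_recorder))
      ((0 : Int), (0 : Int), (0 : Int))
  -- Python 'flag1 == 1 & flag2 == 1' is the chained 'flag1 == (1 & flag2) == 1'
  if st.1 == PySem.Int.band 1 st.2.1 && PySem.Int.band 1 st.2.1 == 1 then 1 else 0

def sequence_calculator (seq1 : String) (seq2 : String)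
    (list_examples : List (List (List (String × String)))) : Int :=
  -- the dead local 'output_string' of A is a pure string build with no effect; omitted
  list_examples.foldl (fun total segm_parag => total + sequence_checker seq1 seq2 segm_parag) 0

-- ===== PORT B =====
def pvClassCodes : List (String × String) :=
  [("reaction set-up", "r-"), ("work-up", "w-"), ("purification", "p-"),
   ("analysis", "a-"), ("unclassified", "u-")]

-- _CODES.get(p["text class"]); outer none = KeyError (excluded by Pre_), inner none = unknown class
def pvCodeOf (p : List (String × String)) : Option String :=
  (PySem.Dict.get? (PySem.Dict.mk p) "text class").bind
    (fun cls => PySem.Dict.get? (PySem.Dict.mk pvClassCodes) cls)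

def pvHasSequence (seq1 seq2 : String) (segm_parag : List (List (String × String))) : Bool :=
  let codes := segm_parag.map pvCodeOf
  match PySem.List.index? codes (some seq1) with
  | none => false                      -- 'seq1 not in codes'
  | some idx => (PySem.List.slice codes (some ((idx : Int) + 1)) none).contains (some seq2)

def sequence_calculator_alt (seq1 : String) (seq2 : String)
    (list_examples : List (List (List (String × String)))) : Int :=
  (list_examples.countP (fun ex => pvHasSequence seq1 seq2 ex) : Int)

-- ===== PRECONDITION & SPEC =====
-- Pre_ excludes exactly the inputs where some paragraph lacks the key "text class": there
-- Python A raises KeyError (and B raises it too).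
def Pre_sequence_calculator (seq1 : String) (seq2 : String)
    (list_examples : List (List (List (String × String)))) : Prop :=
  ∀ ex ∈ list_examples, ∀ p ∈ ex, ∃ kv ∈ p, kv.1 = "text class"
instance (seq1 : String) (seq2 : String) (list_examples : List (List (List (String × String)))) : Decidable (Pre_sequence_calculator seq1 seq2 list_examples) := by unfold Pre_sequence_calculator; infer_instance

def pvWitness_sequence_calculator : String × String × (List (List (List (String × String)))) :=
  ("r-", "w-", [[[("text class", "reaction set-up")], [("text class", "work-up")]]])

def Spec_sequence_calculator (seq1 : String) (seq2 : String) (list_examples : List (List (List (String × String)))) (out : Int) : Prop := out = sequence_calculator_alt seq1 seq2 list_examples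
instance (seq1 : String) (seq2 : String) (list_examples : List (List (List (String × String)))) (out : Int) : Decidable (Spec_sequence_calculator seq1 seq2 list_examples out) := by unfold Spec_sequence_calculator; infer_instance

-- ===== CLAIM (what is proved, stated in full; the proofs are below) =====
def Claim_equal_sequence_calculator : Prop := ∀ (seq1 : String) (seq2 : String) (list_examples : List (List (List (String × String)))), Dom_sequence_calculator seq1 seq2 list_examples → Pre_sequence_calculator seq1 seq2 list_examples → Spec_sequence_calculator seq1 seq2 list_examples (sequence_calculator seq1 seq2 list_examples)

-- ===== LEMMAS AND PROOFS =====

-- the inner dict of B computes exactly A's sequence_recorder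
theorem pvCodes_get_eq (cls : String) :
    PySem.Dict.get? (PySem.Dict.mk pvClassCodes) cls = sequence_recorder cls := by
  by_cases h1 : cls = "reaction set-up"
  · subst h1; rfl
  by_cases h2 : cls = "work-up"
  · subst h2; rfl
  by_cases h3 : cls = "purification"
  · subst h3; rfl
  by_cases h4 : cls = "analysis"
  · subst h4; rfl
  by_cases h5 : cls = "unclassified"
  · subst h5; rfl
  have e1 : (("reaction set-up" : String) == cls) = false := beq_eq_false_iff_ne.mpr (Ne.symm h1)
  have e2 : (("work-up" : String) == cls) = false := beq_eq_false_iff_ne.mpr (Ne.symm h2)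
  have e3 : (("purification" : String) == cls) = false := beq_eq_false_iff_ne.mpr (Ne.symm h3)
  have e4 : (("analysis" : String) == cls) = false := beq_eq_false_iff_ne.mpr (Ne.symm h4)
  have e5 : (("unclassified" : String) == cls) = false := beq_eq_false_iff_ne.mpr (Ne.symm h5)
  simp only [pvClassCodes, sequence_recorder, PySem.Dict.get?_mk_cons, e1, e2, e3, e4, e5,
    Bool.false_eq_true, if_false, beq_iff_eq, h1, h2, h3, h4, h5]
  rfl

theorem pvCodeOf_eq (p : List (String × String)) :
    pvCodeOf p = (pvLookupTC p).bind sequence_recorder := by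
  unfold pvCodeOf pvLookupTC
  cases PySem.Dict.get? (PySem.Dict.mk p) "text class" with
  | none => rfl
  | some cls => simp [pvCodes_get_eq]

-- once seq1 has been seen (state (1, f2, 1)), flag2 becomes 1 iff seq2 occurs later
theorem foldl_core_found (seq1 seq2 : String) (cs : List (Option String)) (f2 : Int) :
    cs.foldl (pvStepCore seq1 seq2) (1, f2, 1)
      = (1, if some seq2 ∈ cs then 1 else f2, 1) := by
  induction cs generalizing f2 with
  | nil => simp
  | cons c cs ih =>
    by_cases h : c = some seq2
    · subst h; simp [pvStepCore, ih]
    · have hne : ¬ (some seq2 = c) := fun hh => h hh.symm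
      simp [pvStepCore, h, ih, hne]

-- full characterisation of the state machine from the initial state
theorem foldl_core_init (seq1 seq2 : String) (cs : List (Option String)) :
    cs.foldl (pvStepCore seq1 seq2) (0, 0, 0)
      = match PySem.List.index? cs (some seq1) with
        | none => (0, 0, 0)
        | some i => (1, if some seq2 ∈ cs.drop (i + 1) then 1 else 0, 1) := by
  induction cs with
  | nil => rfl
  | cons c cs ih =>
    by_cases h : c = some seq1
    · subst h
      rw [PySem.List.index?_cons_self]
      simp [pvStepCore, foldl_core_found]
    · rw [PySem.List.index?_cons_of_ne cs h]
      have hc : pvStepCore seq1 seq2 (0, 0, 0) c = (0, 0, 0) := by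
        simp [pvStepCore, h]
      rw [List.foldl_cons, hc, ih]
      cases hidx : PySem.List.index? cs (some seq1) with
      | none => rfl
      | some i => simp

-- per-example: A's checker is B's boolean
theorem checker_eq_hasSequence (seq1 seq2 : String)
    (ex : List (List (String × String))) :
    sequence_checker seq1 seq2 ex = if pvHasSequence seq1 seq2 ex then 1 else 0 := by
  unfold sequence_checker pvHasSequence
  rw [PySem.List.foldl_pyRange_zero_pyGetD' ex []
        (fun st p => pvStepCore seq1 seq2 st ((pvLookupTC p).bind sequence_recorder))
        ((0 : Int), (0 : Int), (0 : Int))]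
  have hmap : ex.foldl
      (fun st p => pvStepCore seq1 seq2 st ((pvLookupTC p).bind sequence_recorder))
      ((0 : Int), (0 : Int), (0 : Int))
      = (ex.map pvCodeOf).foldl (pvStepCore seq1 seq2) (0, 0, 0) := by
    rw [List.foldl_map]
    simp only [pvCodeOf_eq]
  rw [hmap, foldl_core_init]
  cases hidx : PySem.List.index? (ex.map pvCodeOf) (some seq1) with
  | none =>
    rw [PySem.List.index?_eq_idxOf?] at hidx
    simp [hidx, PySem.Int.band]
  | some i =>
    have hslice : PySem.List.slice (ex.map pvCodeOf) (some ((i : Int) + 1)) none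
        = (ex.map pvCodeOf).drop (i + 1) := by
      have hcast : ((i : Int) + 1) = ((i + 1 : Nat) : Int) := by push_cast; ring
      rw [hcast, PySem.List.slice_from_natCast]
    rw [PySem.List.index?_eq_idxOf?] at hidx
    by_cases hm : some seq2 ∈ (ex.map pvCodeOf).drop (i + 1) <;>
      simp [hidx, hslice, hm, PySem.Int.band]

-- ===== VERDICT (by name: the statement is the Claim_ definition above) =====
theorem sequence_calculator_spec : Claim_equal_sequence_calculator := by
  intro seq1 seq2 list_examples _ _
  unfold Spec_sequence_calculator sequence_calculator sequence_calculator_alt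
  have hfold : list_examples.foldl
      (fun total ex => total + sequence_checker seq1 seq2 ex) 0
      = list_examples.foldl
          (fun total ex => if pvHasSequence seq1 seq2 ex then total + 1 else total) 0 := by
    apply PySem.List.foldl_congr_mem
    intro acc ex _
    rw [checker_eq_hasSequence]
    by_cases h : pvHasSequence seq1 seq2 ex <;> simp [h]
  rw [hfold, PySem.List.foldl_if_add_one]
  simp
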